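-- pv_equiv track=rewrite | github.com/b34nst4lk/facebook_b1_coding_challenge | main.py | get_row_of_bit
-- ===== SOURCE A (Python) =====
-- def get_row_of_bit(row_count: int, column_count: int, bit: int) -> int:
--     if bit <= 0:
--         raise ValueError("Must be positive number that is a power of 2")
--
--     row_mask = 0
--     for column in range(column_count):
--         row_mask |= 1 << column
--
--     for row in range(row_count):
--         if (row_mask << row * column_count) & bit:
--             return row
--
--     raise ValueError(
--         f"unexpected error: row_count: {row_count}, column_count: {column_count}, bit {bin(bit)}, bit_length: {bit.bit_length()}"
--     )
-- ===== SOURCE B (Python) =====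
-- def get_row_of_bit(row_count: int, column_count: int, bit: int) -> int:
--     if bit <= 0:
--         raise ValueError("Must be positive number that is a power of 2")
--     lsb = (bit & -bit).bit_length() - 1
--     if column_count <= 0 or row_count * column_count <= lsb:
--         raise ValueError(
--             f"unexpected error: row_count: {row_count}, column_count: {column_count}, bit {bin(bit)}, bit_length: {bit.bit_length()}"
--         )
--     return lsb // column_count
-- ===== Notes on version B (the rewrite author's own statement) =====
-- stated objective: faster
-- what changed: Replaces A's O(column_count) mask-building loop and O(row_count) row scan by O(1) arithmetic: the row is lowest_set_bit_index // column_count with lowest_set_bit_index = (bit & -bit).bit_length() - 1, plus the same bounds check for the ValueError case.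
import Mathlib
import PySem

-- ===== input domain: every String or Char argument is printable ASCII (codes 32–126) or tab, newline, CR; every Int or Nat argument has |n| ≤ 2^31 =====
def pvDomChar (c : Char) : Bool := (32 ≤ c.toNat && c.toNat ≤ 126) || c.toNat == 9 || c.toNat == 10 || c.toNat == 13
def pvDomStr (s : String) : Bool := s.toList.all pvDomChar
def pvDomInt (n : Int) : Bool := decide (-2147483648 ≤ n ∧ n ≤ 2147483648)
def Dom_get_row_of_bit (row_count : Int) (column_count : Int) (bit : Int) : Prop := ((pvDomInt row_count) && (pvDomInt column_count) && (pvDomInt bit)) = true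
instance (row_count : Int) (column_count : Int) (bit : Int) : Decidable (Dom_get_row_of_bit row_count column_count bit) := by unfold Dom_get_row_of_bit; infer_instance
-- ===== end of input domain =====

-- B replaces A's two loops (mask building + row scan) by O(1) arithmetic on the index of the
-- lowest set bit; the proof shows A's first matching row is exactly lsb(bit) // column_count.

-- ===== PORT A =====
-- 'row_mask |= 1 << column' loop; 'column' only takes values 0,1,… so it is carried as a Nat
-- (Python's '<<' would raise on a negative count, which never occurs here).
def pvMaskLoop : Nat → Nat → Int → Int
  | 0, _, m => m
  | n+1, col, m => pvMaskLoop n (col+1) (PySem.Int.bor m ((1 : Int) <<< col))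

-- 'for row in range(row_count): if (row_mask << row * column_count) & bit: return row'.
-- 'row' is carried as a Nat; the shift count 'row * column_count' is nonnegative on every input
-- admitted by Pre_ (column_count > 0), where Python would raise on a negative count the .toNat
-- is never reached under Pre_.
def pvRowLoop (row_mask cc bit : Int) : Nat → Nat → Int
  | 0, _ => 0  -- loop exhausted: Python raises ValueError; excluded by Pre_
  | n+1, row =>
      if PySem.Int.band (row_mask <<< ((row : Int) * cc).toNat) bit ≠ 0 then (row : Int)
      else pvRowLoop row_mask cc bit n (row+1)

def get_row_of_bit (row_count : Int) (column_count : Int) (bit : Int) : Int :=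
  if bit ≤ 0 then 0  -- Python raises ValueError; excluded by Pre_
  else
    let row_mask := pvMaskLoop column_count.toNat 0 0
    pvRowLoop row_mask column_count bit row_count.toNat 0

-- ===== PORT B =====
-- Python's '(bit & -bit).bit_length() - 1' → PySem.Int.band / PySem.Int.bitLength.
def get_row_of_bit_alt (row_count : Int) (column_count : Int) (bit : Int) : Int :=
  if bit ≤ 0 then 0  -- Python raises ValueError; excluded by Pre_
  else
    let lsb : Int := (PySem.Int.bitLength (PySem.Int.band bit (-bit)) : Int) - 1
    if column_count ≤ 0 ∨ row_count * column_count ≤ lsb then 0  -- Python raises ValueError; excluded by Pre_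
    else PySem.Int.floordiv lsb column_count

-- ===== PRECONDITION & SPEC =====
-- Exactly the inputs on which the Python A returns (everywhere else it raises ValueError):
-- bit positive, at least one column, and the index of bit's lowest set bit — written
-- arithmetically as log2 of (b - (b AND (b-1))), the lowest set bit itself — lies inside the
-- row_count*column_count grid positions the rows' windows cover.
def Pre_get_row_of_bit (row_count : Int) (column_count : Int) (bit : Int) : Prop :=
  0 < bit ∧ 0 < column_count ∧
    ((Nat.log2 (bit.toNat - (bit.toNat &&& (bit.toNat - 1))) : Int)) < row_count * column_count
instance (row_count : Int) (column_count : Int) (bit : Int) : Decidable (Pre_get_row_of_bit row_count column_count bit) := by unfold Pre_get_row_of_bit; infer_instance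

def pvWitness_get_row_of_bit : Int × Int × Int := (3, 4, 16)

def Spec_get_row_of_bit (row_count : Int) (column_count : Int) (bit : Int) (out : Int) : Prop := out = get_row_of_bit_alt row_count column_count bit
instance (row_count : Int) (column_count : Int) (bit : Int) (out : Int) : Decidable (Spec_get_row_of_bit row_count column_count bit out) := by unfold Spec_get_row_of_bit; infer_instance

-- ===== CLAIM (what is proved, stated in full; the proofs are below) =====
def Claim_equal_get_row_of_bit : Prop := ∀ (row_count : Int) (column_count : Int) (bit : Int), Dom_get_row_of_bit row_count column_count bit → Pre_get_row_of_bit row_count column_count bit → Spec_get_row_of_bit row_count column_count bit (get_row_of_bit row_count column_count bit)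

-- ===== LEMMAS AND PROOFS =====

-- Every positive b is 2^(L+1)*k + 2^L with L = padicValNat 2 b.
lemma pv_decomp (b : Nat) (hb : 0 < b) :
    ∃ k, b = 2 ^ (padicValNat 2 b + 1) * k + 2 ^ padicValNat 2 b := by
  set L := padicValNat 2 b with hLdef
  have h1 : 2 ^ L ∣ b := pow_padicValNat_dvd
  have h2 : ¬ 2 ^ (L + 1) ∣ b := by
    haveI : Fact (Nat.Prime 2) := ⟨Nat.prime_two⟩
    exact pow_succ_padicValNat_not_dvd hb.ne'
  obtain ⟨m, hm⟩ := h1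
  rcases Nat.even_or_odd m with he | ho
  · obtain ⟨t, ht⟩ := he
    exact absurd ⟨t, by rw [hm, ht]; ring⟩ h2
  · obtain ⟨k, hk⟩ := ho
    exact ⟨k, by rw [hm, hk]; ring⟩

-- testBit of such a b.
lemma pv_testBit (L k b j : Nat) (h : b = 2 ^ (L+1) * k + 2 ^ L) :
    b.testBit j = if j < L + 1 then decide (L = j) else k.testBit (j - (L+1)) := by
  have hlt : 2 ^ L < 2 ^ (L+1) := Nat.pow_lt_pow_right (by norm_num) (Nat.lt_succ_self L)
  rw [h, Nat.testBit_two_pow_mul_add _ hlt]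
  by_cases hj : j < L + 1
  · simp [hj, Nat.testBit_two_pow]
  · simp [hj]

-- b AND (b-1) clears exactly the lowest set bit.
lemma pv_band_pred (L k b : Nat) (hk : b = 2 ^ (L+1) * k + 2 ^ L) :
    b &&& (b - 1) = 2 ^ (L+1) * k := by
  apply Nat.eq_of_testBit_eq
  intro j
  have hb1 : b - 1 = 2 ^ (L+1) * k + (2 ^ L - 1) := by
    have hP : 1 ≤ 2 ^ L := Nat.one_le_two_pow
    generalize 2 ^ (L+1) * k = P at hk ⊢
    omega
  have hlt : 2 ^ L - 1 < 2 ^ (L+1) := by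
    have : 2 ^ L < 2 ^ (L+1) := Nat.pow_lt_pow_right (by norm_num) (Nat.lt_succ_self L)
    omega
  rw [Nat.testBit_and, pv_testBit L k b j hk, hb1, Nat.testBit_two_pow_mul_add _ hlt,
    Nat.testBit_two_pow_mul]
  by_cases hj : j < L + 1
  · have e1 : (decide (L = j) && decide (j < L)) = false := by
      by_cases hLj : L = j <;> simp [hLj]
    have e2 : (decide (j ≥ L + 1) && k.testBit (j - (L + 1))) = false := by
      rw [decide_eq_false (by omega : ¬ (j ≥ L + 1))]
      simp
    simp only [hj, if_pos, Nat.testBit_two_pow_sub_one]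
    rw [e1, e2]
  · simp [hj, (by omega : j ≥ L + 1)]

-- A's mask loop builds 2^c - 1.
lemma pv_mask (n : Nat) : ∀ col : Nat,
    pvMaskLoop n col (((2 ^ col - 1 : Nat) : Int)) = ((2 ^ (col + n) - 1 : Nat) : Int) := by
  induction n with
  | zero => intro col; simp [pvMaskLoop]
  | succ n ih =>
    intro col
    have hstep : PySem.Int.bor (((2 ^ col - 1 : Nat) : Int)) ((1 : Int) <<< col)
        = (((2 ^ (col + 1) - 1 : Nat)) : Int) := by
      have h1 : (1 : Int) <<< col = (((1 <<< col : Nat)) : Int) := rfl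
      rw [h1, PySem.Int.bor_natCast]
      congr 1
      apply Nat.eq_of_testBit_eq
      intro i
      simp only [Nat.testBit_or, Nat.testBit_two_pow_sub_one, Nat.shiftLeft_eq, one_mul,
        Nat.testBit_two_pow]
      by_cases h : i < col <;> by_cases h2 : col = i <;> simp [h, h2] <;> omega
    rw [pvMaskLoop, hstep, ih (col + 1), (by omega : col + 1 + n = col + (n + 1))]

-- A's row scan returns L / c.
lemma pv_rowLoop (L k b c : Nat) (hb : b = 2 ^ (L+1) * k + 2 ^ L) (hc : 0 < c) :
    ∀ (n r : Nat), r ≤ L / c → L / c < r + n →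
      pvRowLoop ((2 ^ c - 1 : Nat) : Int) (c : Int) (b : Int) n r = ((L / c : Nat) : Int) := by
  intro n
  induction n with
  | zero => intro r h1 h2; omega
  | succ n ih =>
    intro r h1 h2
    have hsh : ((r : Int) * (c : Int)).toNat = r * c := by
      rw [← Nat.cast_mul, Int.toNat_natCast]
    have hband : PySem.Int.band ((((2 ^ c - 1 : Nat)) : Int) <<< ((r : Int) * (c : Int)).toNat) (b : Int)
        = ((((2 ^ c - 1) <<< (r * c)) &&& b : Nat) : Int) := by
      rw [hsh]
      have hcast : (((2 ^ c - 1 : Nat)) : Int) <<< (r * c) = (((2 ^ c - 1) <<< (r * c) : Nat) : Int) := rfl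
      rw [hcast, PySem.Int.band_natCast]
    rcases Nat.lt_or_ge r (L / c) with hr | hr
    · -- this row's window is below the lowest set bit: the branch is not taken
      have hle : r * c + c ≤ L := by
        calc r * c + c = (r + 1) * c := by ring
        _ ≤ (L / c) * c := Nat.mul_le_mul_right c (by omega)
        _ ≤ L := Nat.div_mul_le_self L c
      have h0 : (((2 ^ c - 1) <<< (r * c)) &&& b : Nat) = 0 := by
        apply Nat.eq_of_testBit_eq
        intro j
        simp only [Nat.testBit_and, Nat.testBit_shiftLeft, Nat.testBit_two_pow_sub_one,
          Nat.zero_testBit, pv_testBit L k b j hb]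
        by_cases hj1 : r * c ≤ j
        · by_cases hj2 : j - r * c < c
          · have hjL : j < L := by
              generalize r * c = s at hj1 hj2 hle
              omega
            simp [hj1, hj2, Nat.lt_succ_of_lt hjL]
            omega
          · simp [hj2]
        · simp [(by omega : ¬ (j ≥ r * c))]
      rw [pvRowLoop, if_neg (by rw [hband, h0]; simp), ih (r + 1) (by omega) (by omega)]
    · -- r = L / c: the window contains bit L, the branch is taken
      have hreq : r = L / c := by omega
      have hge : r * c ≤ L := by
        rw [hreq]; exact Nat.div_mul_le_self L c
      have hlt2 : L - r * c < c := by
        have hmod := Nat.div_add_mod L c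
        have := Nat.mod_lt L hc
        rw [hreq]
        generalize hgen : (L / c) * c = s at hmod ⊢
        rw [Nat.mul_comm] at hgen
        omega
      have ht : ((((2 ^ c - 1) <<< (r * c)) &&& b : Nat)).testBit L = true := by
        simp [Nat.testBit_and, Nat.testBit_shiftLeft, Nat.testBit_two_pow_sub_one,
          pv_testBit L k b L hb, hge, hlt2]
      have hne : (((2 ^ c - 1) <<< (r * c)) &&& b : Nat) ≠ 0 := by
        intro h0
        rw [h0] at ht
        simp at ht
      rw [pvRowLoop, if_pos (by rw [hband]; exact_mod_cast hne), hreq]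

-- Pre_'s arithmetic lowest-set-bit expression equals padicValNat 2.
lemma pv_pre (row_count column_count bit : Int)
    (hpre : Pre_get_row_of_bit row_count column_count bit) :
    ((padicValNat 2 bit.toNat : Int)) < row_count * column_count := by
  obtain ⟨hbit, _, hlt⟩ := hpre
  set b := bit.toNat with hbdef
  have hb0 : 0 < b := by omega
  obtain ⟨k, hk⟩ := pv_decomp b hb0
  set L := padicValNat 2 b with hLdef
  have hsub : b - (b &&& (b - 1)) = 2 ^ L := by
    rw [pv_band_pred L k b hk]
    generalize 2 ^ (L+1) * k = P at hk ⊢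
    generalize 2 ^ L = Q at hk ⊢
    omega
  have hlog : Nat.log2 (b - (b &&& (b - 1))) = L := by
    rw [hsub, Nat.log2_eq_log_two, Nat.log_pow (by norm_num)]
  rwa [hlog] at hlt

-- A's value under Pre_.
lemma pv_A (row_count column_count bit : Int)
    (hbit : 0 < bit) (hcc : 0 < column_count)
    (hL : ((padicValNat 2 bit.toNat : Int)) < row_count * column_count) :
    get_row_of_bit row_count column_count bit
      = ((padicValNat 2 bit.toNat / column_count.toNat : Nat) : Int) := by
  set L := padicValNat 2 bit.toNat with hLdef
  set c := column_count.toNat with hcdef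
  set b := bit.toNat with hbdef
  have hb0 : 0 < b := by omega
  have hc0 : 0 < c := by omega
  obtain ⟨k, hk⟩ := pv_decomp b hb0
  rw [← hLdef] at hk
  have hccast : (c : Int) = column_count := Int.toNat_of_nonneg (by omega)
  have hbcast : (b : Int) = bit := Int.toNat_of_nonneg (by omega)
  have hrc0 : 0 < row_count := by
    by_contra hr
    push_neg at hr
    have : row_count * column_count ≤ 0 := mul_nonpos_of_nonpos_of_nonneg hr (by omega)
    have : (0 : Int) ≤ (L : Int) := by positivity
    omega
  have hLlt : L < c * row_count.toNat := by
    have : (L : Int) < ((c * row_count.toNat : Nat) : Int) := by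
      push_cast
      rw [hccast, Int.toNat_of_nonneg (by omega)]
      rw [mul_comm]
      exact hL
    exact_mod_cast this
  have hdiv : L / c < row_count.toNat := by
    rw [Nat.div_lt_iff_lt_mul hc0, Nat.mul_comm]
    exact hLlt
  unfold get_row_of_bit
  rw [if_neg (by omega)]
  have hm : pvMaskLoop column_count.toNat 0 0 = ((2 ^ c - 1 : Nat) : Int) := by
    have := pv_mask c 0
    simpa using this
  rw [hm, ← hccast, ← hbcast]
  have hfin := pv_rowLoop L k b c hk hc0 row_count.toNat 0 (Nat.zero_le _) (by omega)
  exact hfin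

-- B's value under Pre_.
lemma pv_B (row_count column_count bit : Int)
    (hbit : 0 < bit) (hcc : 0 < column_count)
    (hL : ((padicValNat 2 bit.toNat : Int)) < row_count * column_count) :
    get_row_of_bit_alt row_count column_count bit
      = ((padicValNat 2 bit.toNat / column_count.toNat : Nat) : Int) := by
  set L := padicValNat 2 bit.toNat with hLdef
  set c := column_count.toNat with hcdef
  set b := bit.toNat with hbdef
  have hb0 : 0 < b := by omega
  have hc0 : 0 < c := by omega
  obtain ⟨k, hk⟩ := pv_decomp b hb0
  rw [← hLdef] at hk
  have hP : 1 ≤ 2 ^ L := Nat.one_le_two_pow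
  -- bit & -bit = 2^L
  have hband : PySem.Int.band bit (-bit) = ((2 ^ L : Nat) : Int) := by
    unfold PySem.Int.band
    rw [if_pos (by omega), if_neg (by omega)]
    have h1 : (-(-bit) - 1).toNat = b - 1 := by omega
    rw [h1, pv_band_pred L k b hk]
    congr 1
    generalize 2 ^ (L+1) * k = P at hk ⊢
    omega
  -- bit_length of 2^L is L+1
  have hbl : PySem.Int.bitLength (((2 ^ L : Nat)) : Int) = L + 1 := by
    have h1 := PySem.Int.lt_two_pow_bitLength (((2 ^ L : Nat)) : Int)
    have h2 := PySem.Int.two_pow_bitLength_le (((2 ^ L : Nat)) : Int) (by exact_mod_cast (by omega : (2:Nat) ^ L ≠ 0))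
    rw [Int.natAbs_natCast] at h1 h2
    have hlt : L < PySem.Int.bitLength (((2 ^ L : Nat)) : Int) :=
      (Nat.pow_lt_pow_iff_right (by norm_num)).mp h1
    have hle : PySem.Int.bitLength (((2 ^ L : Nat)) : Int) - 1 ≤ L :=
      (Nat.pow_le_pow_iff_right (by norm_num)).mp h2
    omega
  unfold get_row_of_bit_alt
  rw [if_neg (by omega)]
  simp only [hband, hbl]
  have hlsb : ((((L : Nat) + 1 : Nat)) : Int) - 1 = (L : Int) := by push_cast; ring
  rw [hlsb, if_neg (by push_neg; exact ⟨hcc, hL⟩)]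
  have hccast : column_count = (c : Int) := (Int.toNat_of_nonneg (by omega)).symm
  rw [hccast, PySem.Int.floordiv_natCast]

-- ===== VERDICT (by name: the statement is the Claim_ definition above) =====
theorem get_row_of_bit_spec : Claim_equal_get_row_of_bit := by
  intro rc cc bit _hdom hpre
  have hL := pv_pre rc cc bit hpre
  unfold Spec_get_row_of_bit
  rw [pv_A rc cc bit hpre.1 hpre.2.1 hL, pv_B rc cc bit hpre.1 hpre.2.1 hL]
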